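-- pv_equiv track=rewrite | github.com/Gustavo-SNov/EstudosPython | Python/USP-IME/Python Parte 2/Semana 2/primeiro_lex.py | primeiro_lex
-- ===== SOURCE A (Python) =====
-- def primeiro_lex(lista):
--     lex = []
--     for i in range(len(lista)):
--         lex.append(ord(lista[i][0]))
--     n = min(lex)
--     for j in range(len(lex)):
--         if n == lex[j]:
--             return lista[j]
-- ===== SOURCE B (Python) =====
-- def primeiro_lex(lista):
--     # Stable sort by first character; the head is the first element
--     # attaining the smallest first character (stability breaks ties
--     # in favour of the earliest occurrence, as A's re-scan does).
--     return sorted(lista, key=lambda s: s[0])[0]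
-- ===== Notes on version B (the rewrite author's own statement) =====
-- stated objective: alternative
-- what changed: Replaces A's three passes (build a list of ord(s[0]), take its min, re-scan for the first matching index) with a sort-then-head strategy: stably sort by the first character and return the head, whose stability yields the same first-occurrence tie-breaking.
import Mathlib
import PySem

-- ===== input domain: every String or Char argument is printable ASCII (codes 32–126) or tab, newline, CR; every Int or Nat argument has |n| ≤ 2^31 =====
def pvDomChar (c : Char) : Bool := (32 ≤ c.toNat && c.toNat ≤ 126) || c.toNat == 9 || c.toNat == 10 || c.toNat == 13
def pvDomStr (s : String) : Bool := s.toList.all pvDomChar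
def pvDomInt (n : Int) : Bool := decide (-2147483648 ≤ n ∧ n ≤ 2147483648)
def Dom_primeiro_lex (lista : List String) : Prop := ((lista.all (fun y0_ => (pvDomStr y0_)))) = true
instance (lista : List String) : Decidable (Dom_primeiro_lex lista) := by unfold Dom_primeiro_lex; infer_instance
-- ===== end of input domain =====

-- B replaces A's three passes (ord list, min, re-scan for the index) by a stable sort on the first character followed by taking the head; objective: alternative.


-- ===== PORT A =====
-- second loop of A: 'for j in range(len(lex)): if n == lex[j]: return lista[j]'
-- (falling off the loop returns None in Python; that never happens under Pre_, "" is the placeholder)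
def primeiroLexFind (lista : List String) (lex : List Int) (n : Int) : List Int → String
  | [] => ""
  | j :: js =>
    if n = PySem.List.pyGetD lex j 0 then PySem.List.pyGetD lista j ""
    else primeiroLexFind lista lex n js

def primeiro_lex (lista : List String) : String :=
  -- lex = [ord(lista[i][0]) for i in range(len(lista))]   (appending loop)
  let lex := (PySem.List.pyRange 0 (PySem.List.len lista)).map
      (fun i => (((PySem.Str.pyGet? (PySem.List.pyGetD lista i "") 0).getD ' ').toNat : Int))
  -- n = min(lex)   (ValueError on empty list is excluded by Pre_)
  let n := (PySem.List.min? lex (fun x => x)).getD 0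
  primeiroLexFind lista lex n (PySem.List.pyRange 0 (PySem.List.len lex))

-- ===== PORT B =====
-- sorted(lista, key=lambda s: s[0])[0]: stable sort by the first character, then the head
-- ([0] raises IndexError on the empty list; excluded by Pre_, "" is the placeholder)
def primeiro_lex_alt (lista : List String) : String :=
  PySem.List.pyGetD (PySem.List.sorted lista (fun s => (PySem.Str.pyGet? s 0).getD ' ')) 0 ""

-- ===== PRECONDITION & SPEC =====
-- Python A raises ValueError on the empty list (min([])) and IndexError when some element is "" (s[0]); B raises on exactly the same inputs (IndexError on an empty element; IndexError rather than ValueError on the empty list).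
def Pre_primeiro_lex (lista : List String) : Prop := lista ≠ [] ∧ ∀ s ∈ lista, s ≠ ""
instance (lista : List String) : Decidable (Pre_primeiro_lex lista) := by unfold Pre_primeiro_lex; infer_instance
def pvWitness_primeiro_lex : List String := ["ba", "ab", "a"]

def Spec_primeiro_lex (lista : List String) (out : String) : Prop := out = primeiro_lex_alt lista
instance (lista : List String) (out : String) : Decidable (Spec_primeiro_lex lista out) := by unfold Spec_primeiro_lex; infer_instance

-- ===== CLAIM (what is proved, stated in full; the proofs are below) =====
def Claim_equal_primeiro_lex : Prop := ∀ (lista : List String), Dom_primeiro_lex lista → Pre_primeiro_lex lista → Spec_primeiro_lex lista (primeiro_lex lista)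

-- ===== LEMMAS AND PROOFS =====

-- B's sort key: the first character (with a placeholder never used under Pre_)
def pvKeyC (s : String) : Char := (PySem.Str.pyGet? s 0).getD ' '

-- first char code as Int (the value A calls ord on)
def pvKey (s : String) : Int := ((pvKeyC s).toNat : Int)

-- one step of a left-to-right first-minimum scan
def pvStep (m x : String) : String := if pvKeyC x < pvKeyC m then x else m

-- first element attaining the minimum of pvKey, structurally
def pvFirstMin : List String → Option String
  | [] => none
  | x :: xs =>
    match pvFirstMin xs with
    | none => some x
    | some m => if pvKey x ≤ pvKey m then some x else some m

-- scan for the first element whose key equals n (what A's second loop computes)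
def pvScan (n : Int) : List String → String
  | [] => ""
  | x :: xs => if n = pvKey x then x else pvScan n xs

theorem pvFirstMin_ne_none : ∀ (l : List String), l ≠ [] → pvFirstMin l ≠ none := by
  intro l
  induction l with
  | nil => intro h; exact absurd rfl h
  | cons x xs ih =>
    intro _
    simp only [pvFirstMin]
    cases hx : pvFirstMin xs with
    | none => simp
    | some m => by_cases h : pvKey x ≤ pvKey m <;> simp [h]

theorem pvFirstMin_isMin : ∀ (l : List String) (m : String), pvFirstMin l = some m →
    m ∈ l ∧ ∀ y ∈ l, pvKey m ≤ pvKey y := by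
  intro l
  induction l with
  | nil => intro m h; simp [pvFirstMin] at h
  | cons x xs ih =>
    intro m h
    simp only [pvFirstMin] at h
    cases hx : pvFirstMin xs with
    | none =>
      rw [hx] at h
      simp at h; subst h
      have hxs : xs = [] := by
        by_contra hne
        exact pvFirstMin_ne_none xs hne hx
      subst hxs
      simp
    | some m' =>
      rw [hx] at h
      obtain ⟨hmem, hmin⟩ := ih m' hx
      by_cases hle : pvKey x ≤ pvKey m'
      · simp [hle] at h; subst h
        refine ⟨List.mem_cons_self, ?_⟩
        intro y hy
        rcases List.mem_cons.mp hy with rfl | hy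
        · exact le_refl _
        · exact le_trans hle (hmin y hy)
      · simp [hle] at h; subst h
        refine ⟨List.mem_cons_of_mem _ hmem, ?_⟩
        intro y hy
        rcases List.mem_cons.mp hy with rfl | hy
        · omega
        · exact hmin y hy

-- Char '<' on the first characters agrees with the Int key order
theorem pvCharLt_iff (a b : String) : (pvKeyC a < pvKeyC b) ↔ pvKey a < pvKey b := by
  unfold pvKey
  rw [Char.lt_def, UInt32.lt_iff_toNat_lt, Char.toNat_val, Char.toNat_val]
  omega

theorem pvFirstMin_swap (m y : String) (ys : List String) :
    pvFirstMin ((if pvKey y < pvKey m then y else m) :: ys) = pvFirstMin (m :: y :: ys) := by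
  by_cases hlt : pvKey y < pvKey m <;> simp only [hlt, if_pos, pvFirstMin]
  · cases hys : pvFirstMin ys with
    | none => simp [not_le.mpr hlt]
    | some m' =>
      obtain ⟨_, hmin⟩ := pvFirstMin_isMin ys m' hys
      by_cases h1 : pvKey y ≤ pvKey m' <;> simp [h1] <;> intro h2 <;> omega
  · cases hys : pvFirstMin ys with
    | none => simp [hlt]
    | some m' =>
      by_cases h1 : pvKey y ≤ pvKey m'
      · simp only [h1, if_pos]
        by_cases h2 : pvKey m ≤ pvKey y <;> simp [h2] <;> try omega
      · simp only [h1]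
        by_cases h2 : pvKey m ≤ pvKey m' <;> simp [h2] <;> omega

-- the left-to-right strict-'<' scan computes pvFirstMin
theorem pvFoldl_step_eq_firstMin : ∀ (xs : List String) (m0 : String),
    some (xs.foldl pvStep m0) = pvFirstMin (m0 :: xs) := by
  intro xs
  induction xs with
  | nil => intro m0; simp [pvFirstMin]
  | cons y ys ih =>
    intro m0
    have hstep : pvStep m0 y = if pvKey y < pvKey m0 then y else m0 := by
      unfold pvStep
      by_cases h : pvKey y < pvKey m0
      · rw [if_pos ((pvCharLt_iff y m0).mpr h), if_pos h]
      · rw [if_neg (fun hc => h ((pvCharLt_iff y m0).mp hc)), if_neg h]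
    rw [List.foldl_cons, hstep, ih, pvFirstMin_swap]

-- THE SORT-SIDE FACT: the head of the stable insertion sort is the left-to-right first minimum
theorem pvInsertBy_cons (x m : String) (t : List String) :
    PySem.List.insertBy (fun a b => decide (pvKeyC a < pvKeyC b)) x (m :: t)
      = if pvKeyC x < pvKeyC m then x :: m :: t
        else m :: PySem.List.insertBy (fun a b => decide (pvKeyC a < pvKeyC b)) x t := by
  by_cases h : pvKeyC x < pvKeyC m <;>
    simp [PySem.List.insertBy, h]

theorem pvFoldl_insertBy_head : ∀ (xs : List String) (m0 : String) (t : List String),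
    ∃ t', xs.foldl (fun acc x => PySem.List.insertBy (fun a b => decide (pvKeyC a < pvKeyC b)) x acc) (m0 :: t)
      = xs.foldl pvStep m0 :: t' := by
  intro xs
  induction xs with
  | nil => intro m0 t; exact ⟨t, rfl⟩
  | cons y ys ih =>
    intro m0 t
    rw [List.foldl_cons, List.foldl_cons, pvInsertBy_cons]
    by_cases h : pvKeyC y < pvKeyC m0
    · rw [if_pos h, show pvStep m0 y = y from by unfold pvStep; rw [if_pos h]]
      exact ih y (m0 :: t)
    · rw [if_neg h, show pvStep m0 y = m0 from by unfold pvStep; rw [if_neg h]]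
      exact ih m0 _

theorem pvSorted_head (x : String) (xs : List String) :
    PySem.List.sorted (x :: xs) pvKeyC = xs.foldl pvStep x
      :: (PySem.List.sorted (x :: xs) pvKeyC).tail := by
  rw [PySem.List.sorted_eq_foldl_insertBy]
  obtain ⟨t', ht⟩ := pvFoldl_insertBy_head xs x []
  rw [List.foldl_cons]
  simp only [PySem.List.insertBy]
  rw [ht]
  rfl

-- the built list lex is just the map of pvKey
theorem pvLex_eq (lista : List String) :
    (PySem.List.pyRange 0 (PySem.List.len lista)).map
      (fun i => (((PySem.Str.pyGet? (PySem.List.pyGetD lista i "") 0).getD ' ').toNat : Int))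
    = lista.map pvKey := by
  have h := PySem.List.map_pyGetD_pyRange_zero lista ""
  conv_rhs => rw [← h]
  rw [List.map_map]
  rfl

-- A's scan loop over range(len(lex)) from offset k = pvScan over the dropped suffix
theorem pvFind_drop (lista : List String) (n : Int) : ∀ (t : List String) (k : Nat),
    lista.drop k = t →
    primeiroLexFind lista (lista.map pvKey) n (PySem.List.pyRange k (PySem.List.len (lista.map pvKey)))
      = pvScan n t := by
  intro t
  induction t with
  | nil =>
    intro k hk
    have hlen : lista.length ≤ k := List.drop_eq_nil_iff.mp hk
    rw [PySem.List.pyRange_one_eq_nil]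
    · rfl
    · simp [PySem.List.len]; omega
  | cons x xs ih =>
    intro k hk
    have hklt : k < lista.length := by
      by_contra h
      rw [List.drop_eq_nil_of_le (by omega)] at hk; simp at hk
    have heq : lista[k] :: lista.drop (k + 1) = x :: xs :=
      (List.drop_eq_getElem_cons (l := lista) hklt).symm.trans hk
    have hx : lista[k] = x := by injection heq
    have hxs : lista.drop (k + 1) = xs := by injection heq
    rw [PySem.List.pyRange_one_cons (by simp [PySem.List.len]; omega : (k : Int) < PySem.List.len (lista.map pvKey))]
    simp only [primeiroLexFind]
    have hgl : PySem.List.pyGetD (lista.map pvKey) (k : Int) 0 = pvKey x := by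
      rw [PySem.List.pyGetD_natCast]
      rw [List.getD_eq_getElem _ _ (by simpa using hklt)]
      simp [hx]
    have hgs : PySem.List.pyGetD lista (k : Int) "" = x := by
      rw [PySem.List.pyGetD_natCast, List.getD_eq_getElem _ _ hklt, hx]
    rw [hgl, hgs]
    by_cases hn : n = pvKey x
    · simp [pvScan, hn]
    · have : ((k : Int) + 1) = ((k + 1 : Nat) : Int) := by push_cast; ring
      rw [if_neg hn, this, ih (k + 1) hxs]
      simp [pvScan, hn]

theorem pvFind_all (lista : List String) (n : Int) :
    primeiroLexFind lista (lista.map pvKey) n (PySem.List.pyRange 0 (PySem.List.len (lista.map pvKey)))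
      = pvScan n lista := by
  have := pvFind_drop lista n lista 0 (by simp)
  simpa using this

-- the scan for the minimum value returns the first argmin
theorem pvScan_eq_firstMin : ∀ (l : List String) (n : Int),
    (∀ y ∈ l, n ≤ pvKey y) → (∃ y ∈ l, pvKey y = n) →
    some (pvScan n l) = pvFirstMin l := by
  intro l
  induction l with
  | nil => intro n _ hex; simp at hex
  | cons x xs ih =>
    intro n hlb hex
    by_cases hx : n = pvKey x
    · simp only [pvScan, if_pos hx]
      cases hxs : pvFirstMin xs with
      | none => simp [pvFirstMin, hxs]
      | some m =>
        obtain ⟨hm, _⟩ := pvFirstMin_isMin xs m hxs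
        have : pvKey x ≤ pvKey m := hx ▸ hlb m (List.mem_cons_of_mem _ hm)
        simp [pvFirstMin, hxs, this]
    · have hex' : ∃ y ∈ xs, pvKey y = n := by
        rcases hex with ⟨y, hy, hyn⟩
        rcases List.mem_cons.mp hy with rfl | hy
        · exact absurd hyn.symm hx
        · exact ⟨y, hy, hyn⟩
      have hih := ih n (fun y hy => hlb y (List.mem_cons_of_mem _ hy)) hex'
      cases hxs : pvFirstMin xs with
      | none => rw [hxs] at hih; simp at hih
      | some m =>
        obtain ⟨hm, _⟩ := pvFirstMin_isMin xs m hxs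
        have hmn : pvKey m = n := by
          rw [hxs] at hih
          rcases hex' with ⟨y, hy, hyn⟩
          obtain ⟨_, hmin⟩ := pvFirstMin_isMin xs m hxs
          have h1 := hmin y hy
          have h2 := hlb m (List.mem_cons_of_mem _ hm)
          omega
        have hxm : ¬ pvKey x ≤ pvKey m := by
          have := hlb x List.mem_cons_self; omega
        simp only [pvScan, if_neg hx, pvFirstMin, hxs, if_neg hxm]
        rw [hxs] at hih; exact hih

-- ===== VERDICT (by name: the statement is the Claim_ definition above) =====
theorem primeiro_lex_spec : Claim_equal_primeiro_lex := by
  intro lista _ hpre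
  obtain ⟨hne, _⟩ := hpre
  unfold Spec_primeiro_lex primeiro_lex
  rw [pvLex_eq]
  cases lista with
  | nil => exact absurd rfl hne
  | cons x xs =>
    show primeiroLexFind (x :: xs) ((x :: xs).map pvKey) _ _ = primeiro_lex_alt (x :: xs)
    unfold primeiro_lex_alt
    have halt : PySem.List.pyGetD (PySem.List.sorted (x :: xs) (fun s => (PySem.Str.pyGet? s 0).getD ' ')) 0 ""
        = xs.foldl pvStep x := by
      rw [show (fun s => (PySem.Str.pyGet? s 0).getD ' ') = pvKeyC from rfl, pvSorted_head]
      exact PySem.List.pyGetD_zero_cons _ _ _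
    rw [halt]
    set l := x :: xs with hl
    set n := (PySem.List.min? (l.map pvKey) (fun x => x)).getD 0 with hn
    have hmin? : PySem.List.min? (l.map pvKey) (fun x => x) = some n := by
      cases hm : PySem.List.min? (l.map pvKey) (fun x => x) with
      | none => rw [PySem.List.min?_eq_none_iff] at hm; simp [hl] at hm
      | some v => simp [hn, hm]
    have hmem : n ∈ l.map pvKey := PySem.List.min?_mem hmin?
    have hlb : ∀ y ∈ l, n ≤ pvKey y := by
      intro y hy
      exact PySem.List.min?_isMin hmin? _ (List.mem_map_of_mem hy)
    have hex : ∃ y ∈ l, pvKey y = n := by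
      rcases List.mem_map.mp hmem with ⟨y, hy, hyn⟩; exact ⟨y, hy, hyn⟩
    rw [pvFind_all l n]
    have hscan := pvScan_eq_firstMin l n hlb hex
    have hfold := pvFoldl_step_eq_firstMin xs x
    rw [hl] at hscan
    rw [← hfold] at hscan
    exact Option.some.inj hscan
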